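-- pv_equiv track=rewrite | github.com/boshang1988/enigma | python/hashcat_like/attacks.py | parse_mask
-- ===== SOURCE A (Python) =====
-- from typing import Dict, Iterable, Iterator, Sequence
--
-- def parse_mask(mask: str, charsets: Dict[str, str]) -> Sequence[Sequence[str]]:
--     tokens = []
--     idx = 0
--     while idx < len(mask):
--         char = mask[idx]
--         if char == "?" and idx + 1 < len(mask):
--             key = mask[idx + 1]
--             if key not in charsets:
--                 raise ValueError(f"Unknown mask charset '?{key}'")
--             tokens.append(list(charsets[key]))
--             idx += 2
--         else:
--             tokens.append([char])
--             idx += 1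
--     return tokens
-- ===== SOURCE B (Python) =====
-- def parse_mask(mask, charsets):
--     # Phase 1: tokenize into '?x' pairs and single characters (a lone trailing '?' stays single).
--     it = iter(mask)
--     toks = [ch if ch != "?" else ch + next(it, "") for ch in it]
--     # Phase 2: resolve each token independently.
--     return [_resolve(tok, charsets) for tok in toks]
--
--
-- def _resolve(tok, charsets):
--     if len(tok) == 2:
--         key = tok[1]
--         if key not in charsets:
--             raise ValueError(f"Unknown mask charset '?{key}'")
--         return list(charsets[key])
--     return [tok]
-- ===== Notes on version B (the rewrite author's own statement) =====
-- stated objective: idiomatic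
-- what changed: Replaced A's interleaved index-arithmetic while loop with a two-phase pass: an iterator comprehension first tokenizes the mask into '?x' pairs and single characters, then each token is resolved independently against the charsets.
import Mathlib
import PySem

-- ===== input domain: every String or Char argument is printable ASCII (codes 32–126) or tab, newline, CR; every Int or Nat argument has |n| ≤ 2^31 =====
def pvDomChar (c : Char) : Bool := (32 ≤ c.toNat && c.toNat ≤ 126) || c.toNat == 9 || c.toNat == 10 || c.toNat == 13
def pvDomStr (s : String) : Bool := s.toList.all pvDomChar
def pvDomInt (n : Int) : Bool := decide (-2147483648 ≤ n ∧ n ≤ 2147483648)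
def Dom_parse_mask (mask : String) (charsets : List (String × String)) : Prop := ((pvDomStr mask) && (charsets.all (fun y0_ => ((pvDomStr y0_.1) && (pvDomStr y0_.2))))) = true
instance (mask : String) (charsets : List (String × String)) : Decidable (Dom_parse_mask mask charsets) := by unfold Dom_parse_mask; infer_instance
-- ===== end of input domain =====

-- B re-implements parse_mask as a two-phase tokenize-then-resolve pass (idiomatic decomposition)
-- instead of A's interleaved index-arithmetic while loop; same return value wherever A returns.

-- ===== PORT A =====
-- A's while loop over the index, accumulating tokens; none = the ValueError raise.
def parseMaskLoop (cs : List Char) (charsets : List (String × String)) (idx : Nat)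
    (tokens : List (List String)) : Option (List (List String)) :=
  if h : idx < cs.length then
    -- char = mask[idx]
    if h2 : cs[idx] = '?' ∧ idx + 1 < cs.length then
      -- key = mask[idx + 1]
      match (PySem.Dict.ofList charsets).get? (String.mk [cs[idx + 1]'h2.2]) with
      | none => none
      | some v => parseMaskLoop cs charsets (idx + 2) (tokens ++ [v.toList.map (fun c => String.mk [c])])
    else
      parseMaskLoop cs charsets (idx + 1) (tokens ++ [[String.mk [cs[idx]]]])
  else
    some tokens
termination_by cs.length - idx

def parse_mask (mask : String) (charsets : List (String × String)) : List (List String) :=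
  (parseMaskLoop mask.toList charsets 0 []).getD []

-- ===== PORT B =====
-- Phase 1 of Source B: the iterator comprehension producing '?x' pairs and single characters.
def tokenizeMask : List Char → List (List Char)
  | [] => []
  | c :: rest =>
    if c = '?' then
      match rest with
      | [] => [['?']]
      | k :: rest' => ['?', k] :: tokenizeMask rest'
    else
      [c] :: tokenizeMask rest

-- Phase 2 of Source B: _resolve on one token; none = the ValueError raise.
def resolveTok (charsets : List (String × String)) (t : List Char) : Option (List String) :=
  if t.length = 2 then
    match PySem.List.pyGet? t 1 with
    | none => none
    | some k =>
      match (PySem.Dict.ofList charsets).get? (String.mk [k]) with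
      | none => none
      | some v => some (v.toList.map (fun c => String.mk [c]))
  else
    some [String.mk t]

def resolveAll (charsets : List (String × String)) : List (List Char) → Option (List (List String))
  | [] => some []
  | t :: ts =>
    match resolveTok charsets t with
    | none => none
    | some v =>
      match resolveAll charsets ts with
      | none => none
      | some vs => some (v :: vs)

def parse_mask_alt (mask : String) (charsets : List (String × String)) : List (List String) :=
  (resolveAll charsets (tokenizeMask mask.toList)).getD []

-- ===== PRECONDITION & SPEC =====
-- The keys following each consumed '?' in the mask.
def maskKeys : List Char → List Char
  | [] => []
  | c :: rest =>
    if c = '?' then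
      match rest with
      | [] => []
      | k :: rest' => k :: maskKeys rest'
    else
      maskKeys rest

-- Pre_ excludes exactly the inputs where Python A raises ValueError (a '?'-referenced charset key missing).
def Pre_parse_mask (mask : String) (charsets : List (String × String)) : Prop :=
  ((maskKeys mask.toList).all fun k => ((PySem.Dict.ofList charsets).get? (String.mk [k])).isSome) = true
instance (mask : String) (charsets : List (String × String)) : Decidable (Pre_parse_mask mask charsets) := by
  unfold Pre_parse_mask; infer_instance

def pvWitness_parse_mask : String × (List (String × String)) := ("a?d?", [("d", "01")])

def Spec_parse_mask (mask : String) (charsets : List (String × String)) (out : List (List String)) : Prop := out = parse_mask_alt mask charsets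
instance (mask : String) (charsets : List (String × String)) (out : List (List String)) : Decidable (Spec_parse_mask mask charsets out) := by unfold Spec_parse_mask; infer_instance

-- ===== CLAIM (what is proved, stated in full; the proofs are below) =====
def Claim_equal_parse_mask : Prop := ∀ (mask : String) (charsets : List (String × String)), Dom_parse_mask mask charsets → Pre_parse_mask mask charsets → Spec_parse_mask mask charsets (parse_mask mask charsets)

-- ===== LEMMAS AND PROOFS =====

lemma resolveTok_pair (charsets : List (String × String)) (k : Char) :
    resolveTok charsets (['?', k]) =
      match (PySem.Dict.ofList charsets).get? (String.mk [k]) with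
      | none => none
      | some v => some (v.toList.map (fun c => String.mk [c])) := by
  simp [resolveTok, PySem.List.pyGet?, PySem.List.pyIdx?]

lemma resolveTok_single (charsets : List (String × String)) (c : Char) :
    resolveTok charsets [c] = some [String.mk [c]] := by
  simp [resolveTok]

lemma tokenizeMask_pair (k : Char) (rest : List Char) :
    tokenizeMask ('?' :: k :: rest) = ['?', k] :: tokenizeMask rest := rfl

lemma tokenizeMask_cons_ne (c : Char) (rest : List Char) (hc : ¬ c = '?') :
    tokenizeMask (c :: rest) = [c] :: tokenizeMask rest := by
  rw [tokenizeMask.eq_def]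
  simp [hc]

lemma resolveAll_cons (charsets : List (String × String)) (t : List Char) (ts : List (List Char)) :
    resolveAll charsets (t :: ts) =
      match resolveTok charsets t with
      | none => none
      | some v =>
        match resolveAll charsets ts with
        | none => none
        | some vs => some (v :: vs) := rfl

lemma loop_eq_phases (cs : List Char) (charsets : List (String × String)) :
    ∀ n idx tokens, cs.length - idx = n →
      parseMaskLoop cs charsets idx tokens =
        Option.map (tokens ++ ·) (resolveAll charsets (tokenizeMask (cs.drop idx))) := by
  intro n
  induction n using Nat.strong_induction_on with
  | _ n ih =>
    intro idx tokens hn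
    rw [parseMaskLoop]
    by_cases h : idx < cs.length
    · rw [dif_pos h, List.drop_eq_getElem_cons h]
      by_cases hq : cs[idx] = '?'
      · by_cases hlt : idx + 1 < cs.length
        · rw [dif_pos ⟨hq, hlt⟩, List.drop_eq_getElem_cons hlt]
          show (match (PySem.Dict.ofList charsets).get? (String.mk [cs[idx + 1]]) with
            | none => none
            | some v => parseMaskLoop cs charsets (idx + 2) (tokens ++ [v.toList.map (fun c => String.mk [c])])) = _
          conv_rhs => rw [hq]
          rw [tokenizeMask_pair, resolveAll_cons, resolveTok_pair]
          cases hg : (PySem.Dict.ofList charsets).get? (String.mk [cs[idx + 1]]) with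
          | none => simp
          | some v =>
            simp only []
            rw [ih (cs.length - (idx + 2)) (by omega) (idx + 2)
              (tokens ++ [v.toList.map (fun c => String.mk [c])]) rfl]
            show _ = Option.map _ (match resolveAll charsets (tokenizeMask (cs.drop (idx + 2))) with
              | none => none
              | some vs => some (v.toList.map (fun c => String.mk [c]) :: vs))
            cases resolveAll charsets (tokenizeMask (cs.drop (idx + 2))) <;> simp
        · rw [dif_neg (by simp [hlt])]
          have hd : cs.drop (idx + 1) = [] := List.drop_eq_nil_of_le (by omega)
          rw [ih (cs.length - (idx + 1)) (by omega) (idx + 1)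
            (tokens ++ [[String.mk [cs[idx]]]]) rfl, hd, hq]
          show _ = Option.map _ (resolveAll charsets (tokenizeMask ['?']))
          rw [show tokenizeMask ['?'] = [['?']] from rfl, resolveAll_cons, resolveTok_single]
          simp [tokenizeMask, resolveAll]
      · rw [dif_neg (by simp [hq])]
        rw [ih (cs.length - (idx + 1)) (by omega) (idx + 1)
          (tokens ++ [[String.mk [cs[idx]]]]) rfl]
        rw [tokenizeMask_cons_ne _ _ hq, resolveAll_cons, resolveTok_single]
        cases resolveAll charsets (tokenizeMask (cs.drop (idx + 1))) <;> simp
    · rw [dif_neg h, List.drop_eq_nil_of_le (by omega)]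
      simp [tokenizeMask, resolveAll]

-- ===== VERDICT (by name: the statement is the Claim_ definition above) =====
theorem parse_mask_spec : Claim_equal_parse_mask := by
  intro mask charsets _ _
  unfold Spec_parse_mask parse_mask parse_mask_alt
  rw [loop_eq_phases mask.toList charsets (mask.toList.length) 0 [] rfl]
  simp [Option.getD, Option.map]
  cases resolveAll charsets (tokenizeMask mask.toList) <;> simp
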